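-- pv_equiv track=rewrite | github.com/cbohlman/AoC2024 | 15/15.py | valid_bfs
-- ===== SOURCE A (Python) =====
-- def valid_bfs(pos, direction, grid, seen):
--     if pos in seen:
--         return True
--     seen.add(pos)
--
--     y,x = pos
--     dy,dx = direction
--     new_y, new_x = y+dy, x+dx
--
--     if grid[new_y][new_x] == '#':
--         return False
--     if grid[new_y][new_x] == '.':
--         return True
--     if grid[new_y][new_x] == '[':
--         return valid_bfs((new_y, new_x), direction, grid, seen) and valid_bfs((new_y, new_x + 1), direction, grid, seen)
--     if grid[new_y][new_x] == ']':
--         return valid_bfs((new_y, new_x), direction, grid, seen) and valid_bfs((new_y, new_x - 1), direction, grid, seen)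
-- ===== SOURCE B (Python) =====
-- def valid_bfs(pos, direction, grid, seen):
--     dy, dx = direction
--     stack = [pos]
--     while stack:
--         p = stack.pop()
--         if p in seen:
--             continue
--         seen.add(p)
--         y, x = p
--         c = grid[y + dy][x + dx]
--         if c == '#':
--             return False
--         if c == '[':
--             stack.append((y + dy, x + dx + 1))
--             stack.append((y + dy, x + dx))
--         elif c == ']':
--             stack.append((y + dy, x + dx - 1))
--             stack.append((y + dy, x + dx))
--         # '.' (or any other cell): nothing to push
--     return True
-- ===== Notes on version B (the rewrite author's own statement) =====
-- stated objective: alternative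
-- what changed: Replaced A's recursive flood-fill (nested short-circuiting recursive calls mutating `seen`) by an iterative DFS with an explicit stack seeded with pos: pop a position, skip if seen, otherwise mark it and on '[' / ']' push the two successor cells (in reverse, preserving A's pre-order), returning False on '#' and True when the stack empties.
-- outside the precondition, e.g. on valid_bfs((1, 0), (0, 0), ['', 'a'], {(1, 1), (0, 0)}): A returns None, B returns True; on valid_bfs((1, 1), (0, 1), ['......', '..[]..', '......'], set()): A returns True, B returns True
import Mathlib
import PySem

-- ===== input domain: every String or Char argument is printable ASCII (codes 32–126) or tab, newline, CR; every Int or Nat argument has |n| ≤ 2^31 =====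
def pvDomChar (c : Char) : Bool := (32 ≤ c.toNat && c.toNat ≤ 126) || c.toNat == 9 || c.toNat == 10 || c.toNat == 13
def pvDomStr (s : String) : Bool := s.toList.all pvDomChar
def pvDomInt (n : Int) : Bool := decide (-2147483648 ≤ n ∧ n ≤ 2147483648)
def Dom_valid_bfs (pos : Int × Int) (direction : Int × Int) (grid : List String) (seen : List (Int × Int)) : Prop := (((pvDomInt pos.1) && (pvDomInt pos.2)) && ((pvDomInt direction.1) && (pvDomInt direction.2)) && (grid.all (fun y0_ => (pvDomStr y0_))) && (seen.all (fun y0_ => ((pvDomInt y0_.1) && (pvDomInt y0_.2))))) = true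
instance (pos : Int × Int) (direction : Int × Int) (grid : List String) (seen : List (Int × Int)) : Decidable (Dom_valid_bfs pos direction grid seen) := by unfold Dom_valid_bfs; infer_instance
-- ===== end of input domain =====

-- B replaces A's recursive flood-fill by an iterative explicit-stack DFS (same pre-order, so both
-- mutate `seen` identically); the theorems below are about the return value.

-- ===== PORT A =====
-- grid[y][x] with Python indexing semantics (negative wrap; none = IndexError)
def pvCell (grid : List String) (q : Int × Int) : Option Char :=
  (PySem.List.pyGet? grid q.1).bind (fun s => PySem.Str.pyGet? s q.2)

-- all in-range coordinates of the (rectangular, under Pre_) grid; its length bounds the recursion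
-- depth / iteration count, used as fuel for the ports' loops
def pvCells (grid : List String) : List (Int × Int) :=
  ((List.range grid.length).product (List.range grid.headI.toList.length)).map
    (fun p => ((p.1 : Int), (p.2 : Int)))

-- literal transliteration of A's recursion, `seen` threaded as state (Python mutates the set in
-- place); none = IndexError / fell through all ifs returning None (not a Bool) / fuel exhausted,
-- all excluded by Pre_
def pvGoA : Nat → (Int × Int) → (Int × Int) → List String → PySem.Set (Int × Int) →
    Option (Bool × PySem.Set (Int × Int))
  | 0, _, _, _, _ => none
  | fuel + 1, pos, direction, grid, seen =>
    if pos ∈ seen then some (true, seen)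
    else
      match pvCell grid (pos.1 + direction.1, pos.2 + direction.2) with
      | none => none
      | some c =>
        if c = '#' then some (false, PySem.Set.add seen pos)
        else if c = '.' then some (true, PySem.Set.add seen pos)
        else if c = '[' then
          match pvGoA fuel (pos.1 + direction.1, pos.2 + direction.2) direction grid
              (PySem.Set.add seen pos) with
          | none => none
          | some (false, s2) => some (false, s2)   -- Python `and` short-circuits
          | some (true, s2) =>
              pvGoA fuel (pos.1 + direction.1, pos.2 + direction.2 + 1) direction grid s2
        else if c = ']' then
          match pvGoA fuel (pos.1 + direction.1, pos.2 + direction.2) direction grid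
              (PySem.Set.add seen pos) with
          | none => none
          | some (false, s2) => some (false, s2)
          | some (true, s2) =>
              pvGoA fuel (pos.1 + direction.1, pos.2 + direction.2 - 1) direction grid s2
        else none   -- Python falls through every `if` and returns None

def valid_bfs (pos : Int × Int) (direction : Int × Int) (grid : List String)
    (seen : List (Int × Int)) : Bool :=
  match pvGoA ((pvCells grid).length + 1) pos direction grid (PySem.Set.ofList seen) with
  | some (b, _) => b
  | none => false   -- unreachable under Pre_

-- ===== PORT B =====
-- literal transliteration of B's while-loop: explicit stack, pop, skip if seen, else mark and
-- branch on the pushed-into cell; none = IndexError / fuel exhausted (excluded by Pre_)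
def pvGoB : Nat → List (Int × Int) → (Int × Int) → List String → PySem.Set (Int × Int) →
    Option Bool
  | _, [], _, _, _ => some true
  | 0, _ :: _, _, _, _ => none
  | fuel + 1, p :: rest, direction, grid, seen =>
    if p ∈ seen then pvGoB fuel rest direction grid seen
    else
      match pvCell grid (p.1 + direction.1, p.2 + direction.2) with
      | none => none
      | some c =>
        if c = '#' then some false
        else if c = '[' then
          pvGoB fuel ((p.1 + direction.1, p.2 + direction.2) ::
            (p.1 + direction.1, p.2 + direction.2 + 1) :: rest) direction grid
            (PySem.Set.add seen p)
        else if c = ']' then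
          pvGoB fuel ((p.1 + direction.1, p.2 + direction.2) ::
            (p.1 + direction.1, p.2 + direction.2 - 1) :: rest) direction grid
            (PySem.Set.add seen p)
        else pvGoB fuel rest direction grid (PySem.Set.add seen p)

def valid_bfs_alt (pos : Int × Int) (direction : Int × Int) (grid : List String)
    (seen : List (Int × Int)) : Bool :=
  match pvGoB (2 * (pvCells grid).length + 2) [pos] direction grid (PySem.Set.ofList seen) with
  | some b => b
  | none => false   -- unreachable under Pre_

-- ===== PRECONDITION & SPEC =====
def pvNbr (pos direction : Int × Int) (grid : List String) : Option Char :=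
  pvCell grid (pos.1 + direction.1, pos.2 + direction.2)

def pvW (grid : List String) : Nat := grid.headI.toList.length

def pvInterior (grid : List String) (q : Int × Int) : Prop :=
  1 ≤ q.1 ∧ q.1 ≤ (grid.length : Int) - 2 ∧ 1 ≤ q.2 ∧ q.2 ≤ (pvW grid : Int) - 2

def pvUnitDir (d : Int × Int) : Prop :=
  d = (0, 1) ∨ d = (0, -1) ∨ d = (1, 0) ∨ d = (-1, 0)

-- well-formed warehouse grid: uniform row width, only '#' '.' '[' ']', a full '#' border,
-- and every '[' immediately followed by ']' (and conversely)
def pvGood (grid : List String) : Prop :=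
  (∀ s ∈ grid, s.toList.length = pvW grid) ∧
  (∀ q ∈ pvCells grid, pvCell grid q = some '#' ∨ pvCell grid q = some '.' ∨
      pvCell grid q = some '[' ∨ pvCell grid q = some ']') ∧
  (∀ q ∈ pvCells grid,
      (q.1 = 0 ∨ q.1 = (grid.length : Int) - 1 ∨ q.2 = 0 ∨ q.2 = (pvW grid : Int) - 1) →
      pvCell grid q = some '#') ∧
  (∀ q ∈ pvCells grid, pvCell grid q = some '[' → pvCell grid (q.1, q.2 + 1) = some ']') ∧
  (∀ q ∈ pvCells grid, pvCell grid q = some ']' → pvCell grid (q.1, q.2 - 1) = some '[')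

-- Pre_ admits every input on which A returns at once (pos already in seen, or the pushed-into cell
-- is '#' or '.') and otherwise the function's natural domain: well-formed warehouse grids with a
-- unit direction and an interior pos; outside these A's recursion can raise IndexError or return
-- None (not a Bool), and the returning inputs it also excludes are deeper runs over malformed grids.
def Pre_valid_bfs (pos : Int × Int) (direction : Int × Int) (grid : List String)
    (seen : List (Int × Int)) : Prop :=
  pos ∈ seen ∨ pvNbr pos direction grid = some '#' ∨ pvNbr pos direction grid = some '.' ∨
    (pvGood grid ∧ pvUnitDir direction ∧ pvInterior grid pos)

instance (pos : Int × Int) (direction : Int × Int) (grid : List String)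
    (seen : List (Int × Int)) : Decidable (Pre_valid_bfs pos direction grid seen) := by
  unfold Pre_valid_bfs pvGood pvUnitDir pvInterior; infer_instance

def pvWitness_valid_bfs : (Int × Int) × (Int × Int) × List String × (List (Int × Int)) :=
  ((1, 1), (0, 1), ["#####", "#.[]#", "#####"], [])

def Spec_valid_bfs (pos : Int × Int) (direction : Int × Int) (grid : List String)
    (seen : List (Int × Int)) (out : Bool) : Prop := out = valid_bfs_alt pos direction grid seen

instance (pos : Int × Int) (direction : Int × Int) (grid : List String)
    (seen : List (Int × Int)) (out : Bool) :
    Decidable (Spec_valid_bfs pos direction grid seen out) := by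
  unfold Spec_valid_bfs; infer_instance

-- ===== CLAIM (what is proved, stated in full; the proofs are below) =====
def Claim_equal_valid_bfs : Prop := ∀ (pos : Int × Int) (direction : Int × Int) (grid : List String) (seen : List (Int × Int)), Dom_valid_bfs pos direction grid seen → Pre_valid_bfs pos direction grid seen → Spec_valid_bfs pos direction grid seen (valid_bfs pos direction grid seen)

-- ===== LEMMAS AND PROOFS =====

theorem pvMem_cells (grid : List String) (q : Int × Int) :
    q ∈ pvCells grid ↔ 0 ≤ q.1 ∧ q.1 < (grid.length : Int) ∧ 0 ≤ q.2 ∧ q.2 < (pvW grid : Int) := by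
  unfold pvCells pvW
  simp only [List.mem_map]
  constructor
  · rintro ⟨⟨a, b⟩, hab, rfl⟩
    rw [List.pair_mem_product] at hab
    simp only [List.mem_range] at hab
    dsimp only; omega
  · rintro ⟨h0, h1, h2, h3⟩
    refine ⟨⟨q.1.toNat, q.2.toNat⟩, ?_, ?_⟩
    · rw [List.pair_mem_product]; simp only [List.mem_range]; omega
    · rw [Prod.ext_iff]; constructor <;> simp <;> omega

-- number of grid coordinates not yet in `seen`: the termination measure of both searches
def pvFree (grid : List String) (s : PySem.Set (Int × Int)) : Nat :=
  ((pvCells grid).filter (fun q => decide (q ∉ s))).length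

theorem pvFilterMono {α : Type} (l : List α) (p q : α → Bool)
    (h : ∀ x ∈ l, p x = true → q x = true) :
    (l.filter p).length ≤ (l.filter q).length := by
  induction l with
  | nil => simp
  | cons x l ih =>
    have ih' := ih (fun y hy => h y (List.mem_cons_of_mem _ hy))
    by_cases hp : p x = true
    · simp [hp, h x (List.mem_cons_self) hp]; omega
    · simp only [Bool.not_eq_true] at hp
      simp only [List.filter_cons, hp]
      cases hq : q x <;> simp <;> omega

theorem pvFree_mono (grid : List String) (s t : PySem.Set (Int × Int))
    (h : ∀ x, x ∈ s → x ∈ t) : pvFree grid t ≤ pvFree grid s := by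
  unfold pvFree
  refine pvFilterMono _ _ _ (fun x _ hx => ?_)
  simp only [decide_eq_true_eq] at hx ⊢
  exact fun hxs => hx (h x hxs)

theorem pvFree_drop (grid : List String) (s : PySem.Set (Int × Int)) (p : Int × Int)
    (hp : p ∈ pvCells grid) (hns : p ∉ s) :
    pvFree grid (PySem.Set.add s p) + 1 ≤ pvFree grid s := by
  unfold pvFree
  have himp : ∀ x : Int × Int, x ∉ PySem.Set.add s p → x ∉ s := by
    intro x hx hxs; exact hx (by rw [PySem.Set.mem_add]; exact Or.inl hxs)
  have hgen : ∀ l : List (Int × Int), p ∈ l →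
      (l.filter (fun q => decide (q ∉ PySem.Set.add s p))).length + 1 ≤
        (l.filter (fun q => decide (q ∉ s))).length := by
    intro l hl
    induction l with
    | nil => cases hl
    | cons x l ih =>
      have hmono := pvFilterMono l (fun q => decide (q ∉ PySem.Set.add s p))
        (fun q => decide (q ∉ s)) (fun y _ hy => by
          simp only [decide_eq_true_eq] at hy ⊢; exact himp y hy)
      rcases List.mem_cons.1 hl with heq | hxl
      · subst heq
        have hmem : p ∈ PySem.Set.add s p := by rw [PySem.Set.mem_add]; exact Or.inr rfl
        simp only [List.filter_cons, decide_eq_true_eq]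
        rw [if_neg (by simp [hmem]), if_pos hns]
        simp only [List.length_cons]
        omega
      · have ih' := ih hxl
        simp only [List.filter_cons, decide_eq_true_eq]
        by_cases hxs : x ∈ PySem.Set.add s p
        · rw [if_neg (by simp [hxs])]
          rcases (PySem.Set.mem_add _ _ _).1 hxs with hxe | heq
          · rw [if_neg (by simp [hxe])]; omega
          · subst heq
            rw [if_pos hns]
            simp only [List.length_cons]; omega
        · have hxe : x ∉ s := fun h' => hxs (by rw [PySem.Set.mem_add]; exact Or.inl h')
          rw [if_pos hxs, if_pos hxe]
          simp only [List.length_cons]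
          omega
  exact hgen _ hp

theorem pvFree_le (grid : List String) (s : PySem.Set (Int × Int)) :
    pvFree grid s ≤ (pvCells grid).length := List.length_filter_le _ _

theorem pvCell_mem_cells (grid : List String) (hg : pvGood grid) (q : Int × Int) (c : Char)
    (h0 : 0 ≤ q.1) (h1 : 0 ≤ q.2) (hc : pvCell grid q = some c) : q ∈ pvCells grid := by
  unfold pvCell at hc
  cases hrow : PySem.List.pyGet? grid q.1 with
  | none => rw [hrow] at hc; simp at hc
  | some row =>
    rw [hrow] at hc
    simp only [Option.bind_some] at hc
    rw [PySem.List.pyGet?_of_nonneg grid h0] at hrow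
    have hmem : row ∈ grid := List.mem_of_getElem? hrow
    have hlt : q.1.toNat < grid.length := (List.getElem?_eq_some_iff.1 hrow).1
    have hw : row.toList.length = pvW grid := hg.1 row hmem
    simp only [PySem.Str.pyGet?_eq, PySem.Chars.pyGet?_eq_listPyGet?] at hc
    rw [PySem.List.pyGet?_of_nonneg row.toList h1] at hc
    have hlt2 : q.2.toNat < row.toList.length := (List.getElem?_eq_some_iff.1 hc).1
    rw [pvMem_cells]
    omega

theorem pvInterior_of_cell (grid : List String) (hg : pvGood grid) (q : Int × Int)
    (hq : q ∈ pvCells grid) (hne : ¬ pvCell grid q = some '#') : pvInterior grid q := by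
  by_contra hni
  have hb := (pvMem_cells grid q).1 hq
  unfold pvInterior at hni
  push Not at hni
  have hborder : q.1 = 0 ∨ q.1 = (grid.length : Int) - 1 ∨ q.2 = 0 ∨
      q.2 = (pvW grid : Int) - 1 := by
    by_cases e1 : q.1 = 0
    · exact Or.inl e1
    · by_cases e2 : q.1 = (grid.length : Int) - 1
      · exact Or.inr (Or.inl e2)
      · by_cases e3 : q.2 = 0
        · exact Or.inr (Or.inr (Or.inl e3))
        · refine Or.inr (Or.inr (Or.inr ?_)); omega
  exact hne (hg.2.2.1 q hq hborder)

theorem pvInterior_mem (grid : List String) (q : Int × Int) (h : pvInterior grid q) :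
    q ∈ pvCells grid := by
  rw [pvMem_cells]; obtain ⟨a, b, c, d⟩ := h; omega

theorem pvNp_mem (grid : List String) (dir pos : Int × Int) (hd : pvUnitDir dir)
    (h : pvInterior grid pos) : (pos.1 + dir.1, pos.2 + dir.2) ∈ pvCells grid := by
  obtain ⟨a, b, c, d⟩ := h
  rcases hd with rfl | rfl | rfl | rfl <;> (rw [pvMem_cells]; simp; omega)

theorem pvGoA_subset : ∀ (f : Nat) (pos direction : Int × Int) (grid : List String)
    (seen : PySem.Set (Int × Int)) (b : Bool) (s' : PySem.Set (Int × Int)),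
    pvGoA f pos direction grid seen = some (b, s') → ∀ x, x ∈ seen → x ∈ s' := by
  intro f
  induction f with
  | zero => intro pos dir grid seen b s' h; simp [pvGoA] at h
  | succ f ih =>
    intro pos dir grid seen b s' h x hx
    simp only [pvGoA] at h
    by_cases hm : pos ∈ seen
    · rw [if_pos hm] at h
      simp only [Option.some.injEq, Prod.mk.injEq] at h
      obtain ⟨-, rfl⟩ := h
      exact hx
    · rw [if_neg hm] at h
      have hx1 : x ∈ PySem.Set.add seen pos := by rw [PySem.Set.mem_add]; exact Or.inl hx
      cases hc : pvCell grid (pos.1 + dir.1, pos.2 + dir.2) with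
      | none => simp only [hc] at h; cases h
      | some c =>
        simp only [hc] at h
        by_cases h1 : c = '#'
        · rw [if_pos h1] at h
          simp only [Option.some.injEq, Prod.mk.injEq] at h
          obtain ⟨-, rfl⟩ := h; exact hx1
        · rw [if_neg h1] at h
          by_cases h2 : c = '.'
          · rw [if_pos h2] at h
            simp only [Option.some.injEq, Prod.mk.injEq] at h
            obtain ⟨-, rfl⟩ := h; exact hx1
          · rw [if_neg h2] at h
            by_cases h4 : c = '['
            · rw [if_pos h4] at h
              cases ha : pvGoA f (pos.1 + dir.1, pos.2 + dir.2) dir grid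
                  (PySem.Set.add seen pos) with
              | none => simp only [ha] at h; cases h
              | some pr =>
                obtain ⟨b1, s2⟩ := pr
                cases b1 with
                | false =>
                  simp only [ha] at h
                  simp only [Option.some.injEq, Prod.mk.injEq] at h
                  obtain ⟨-, rfl⟩ := h
                  exact ih _ _ _ _ _ _ ha x hx1
                | true =>
                  simp only [ha] at h
                  exact ih _ _ _ _ _ _ h x (ih _ _ _ _ _ _ ha x hx1)
            · rw [if_neg h4] at h
              by_cases h5 : c = ']'
              · rw [if_pos h5] at h
                cases ha : pvGoA f (pos.1 + dir.1, pos.2 + dir.2) dir grid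
                    (PySem.Set.add seen pos) with
                | none => simp only [ha] at h; cases h
                | some pr =>
                  obtain ⟨b1, s2⟩ := pr
                  cases b1 with
                  | false =>
                    simp only [ha] at h
                    simp only [Option.some.injEq, Prod.mk.injEq] at h
                    obtain ⟨-, rfl⟩ := h
                    exact ih _ _ _ _ _ _ ha x hx1
                  | true =>
                    simp only [ha] at h
                    exact ih _ _ _ _ _ _ h x (ih _ _ _ _ _ _ ha x hx1)
              · rw [if_neg h5] at h; cases h

theorem pvGoA_total (grid : List String) (dir : Int × Int) (hg : pvGood grid)
    (hd : pvUnitDir dir) : ∀ (f : Nat) (pos : Int × Int) (s : PySem.Set (Int × Int)),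
    pvInterior grid pos → pvFree grid s + 1 ≤ f →
    ∃ b s', pvGoA f pos dir grid s = some (b, s') := by
  intro f
  induction f with
  | zero => intro pos s _ hfuel; omega
  | succ f ih =>
    intro pos s hpos hfuel
    by_cases hm : pos ∈ s
    · exact ⟨true, s, by simp [pvGoA, hm]⟩
    · have hposc : pos ∈ pvCells grid := pvInterior_mem grid pos hpos
      have hfree : pvFree grid (PySem.Set.add s pos) + 1 ≤ pvFree grid s :=
        pvFree_drop grid s pos hposc hm
      have hnp : (pos.1 + dir.1, pos.2 + dir.2) ∈ pvCells grid := pvNp_mem grid dir pos hd hpos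
      rcases hg.2.1 _ hnp with hc | hc | hc | hc
      · exact ⟨false, PySem.Set.add s pos, by simp [pvGoA, hm, hc]⟩
      · exact ⟨true, PySem.Set.add s pos, by simp [pvGoA, hm, hc]⟩
      · have hint : pvInterior grid (pos.1 + dir.1, pos.2 + dir.2) :=
          pvInterior_of_cell grid hg _ hnp (by rw [hc]; simp)
        have hc2 : pvCell grid (pos.1 + dir.1, pos.2 + dir.2 + 1) = some ']' :=
          hg.2.2.2.1 _ hnp hc
        obtain ⟨ha1, ha2, ha3, ha4⟩ := hint
        dsimp only at ha1 ha2 ha3 ha4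
        have hmem2 : (pos.1 + dir.1, pos.2 + dir.2 + 1) ∈ pvCells grid :=
          pvCell_mem_cells grid hg _ _ (by dsimp only; omega) (by dsimp only; omega) hc2
        have hint2 : pvInterior grid (pos.1 + dir.1, pos.2 + dir.2 + 1) :=
          pvInterior_of_cell grid hg _ hmem2 (by rw [hc2]; simp)
        obtain ⟨b1, s2, h1⟩ := ih (pos.1 + dir.1, pos.2 + dir.2) (PySem.Set.add s pos)
          ⟨ha1, ha2, ha3, ha4⟩ (by omega)
        rw [PySem.Set.add_of_not_mem hm] at h1
        cases b1 with
        | false => exact ⟨false, s2, by simp [pvGoA, hm, hc, h1]⟩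
        | true =>
          have hsub := pvGoA_subset f _ dir grid _ _ _ h1
          have hmono : pvFree grid s2 ≤ pvFree grid (PySem.Set.add s pos) :=
            pvFree_mono grid _ _ (by rw [PySem.Set.add_of_not_mem hm]; exact hsub)
          obtain ⟨b2, s3, h2⟩ := ih (pos.1 + dir.1, pos.2 + dir.2 + 1) s2 hint2 (by omega)
          exact ⟨b2, s3, by simp [pvGoA, hm, hc, h1, h2]⟩
      · have hint : pvInterior grid (pos.1 + dir.1, pos.2 + dir.2) :=
          pvInterior_of_cell grid hg _ hnp (by rw [hc]; simp)
        have hc2 : pvCell grid (pos.1 + dir.1, pos.2 + dir.2 - 1) = some '[' :=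
          hg.2.2.2.2 _ hnp hc
        obtain ⟨ha1, ha2, ha3, ha4⟩ := hint
        dsimp only at ha1 ha2 ha3 ha4
        have hmem2 : (pos.1 + dir.1, pos.2 + dir.2 - 1) ∈ pvCells grid :=
          pvCell_mem_cells grid hg _ _ (by dsimp only; omega)
            (by dsimp only
                have hb := (pvMem_cells grid _).1 hnp
                dsimp only at hb
                by_contra hneg
                have he : pos.2 + dir.2 = 0 := by omega
                have : pvCell grid (pos.1 + dir.1, pos.2 + dir.2) = some '#' :=
                  hg.2.2.1 _ hnp (by dsimp only; omega)
                rw [hc] at this; simp at this) hc2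
        have hint2 : pvInterior grid (pos.1 + dir.1, pos.2 + dir.2 - 1) :=
          pvInterior_of_cell grid hg _ hmem2 (by rw [hc2]; simp)
        obtain ⟨b1, s2, h1⟩ := ih (pos.1 + dir.1, pos.2 + dir.2) (PySem.Set.add s pos)
          ⟨ha1, ha2, ha3, ha4⟩ (by omega)
        rw [PySem.Set.add_of_not_mem hm] at h1
        cases b1 with
        | false => exact ⟨false, s2, by simp [pvGoA, hm, hc, h1]⟩
        | true =>
          have hsub := pvGoA_subset f _ dir grid _ _ _ h1
          have hmono : pvFree grid s2 ≤ pvFree grid (PySem.Set.add s pos) :=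
            pvFree_mono grid _ _ (by rw [PySem.Set.add_of_not_mem hm]; exact hsub)
          obtain ⟨b2, s3, h2⟩ := ih (pos.1 + dir.1, pos.2 + dir.2 - 1) s2 hint2 (by omega)
          exact ⟨b2, s3, by simp [pvGoA, hm, hc, h1, h2]⟩

theorem pvGoB_mono : ∀ (f : Nat) (st : List (Int × Int)) (dir : Int × Int)
    (grid : List String) (s : PySem.Set (Int × Int)) (r : Bool),
    pvGoB f st dir grid s = some r → pvGoB (f + 1) st dir grid s = some r := by
  intro f
  induction f with
  | zero =>
    intro st dir grid s r h
    cases st with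
    | nil => simpa [pvGoB] using h
    | cons p rest => simp [pvGoB] at h
  | succ f ih =>
    intro st dir grid s r h
    cases st with
    | nil => simpa [pvGoB] using h
    | cons p rest =>
      simp only [pvGoB] at h ⊢
      by_cases hm : p ∈ s
      · rw [if_pos hm] at h ⊢; exact ih _ _ _ _ _ h
      · rw [if_neg hm] at h ⊢
        cases hc : pvCell grid (p.1 + dir.1, p.2 + dir.2) with
        | none => simp only [hc] at h; cases h
        | some c =>
          simp only [hc] at h ⊢
          by_cases h1 : c = '#'
          · rw [if_pos h1] at h ⊢; exact h
          · rw [if_neg h1] at h ⊢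
            by_cases h2 : c = '['
            · rw [if_pos h2] at h ⊢; exact ih _ _ _ _ _ h
            · rw [if_neg h2] at h ⊢
              by_cases h3 : c = ']'
              · rw [if_pos h3] at h ⊢; exact ih _ _ _ _ _ h
              · rw [if_neg h3] at h ⊢; exact ih _ _ _ _ _ h

theorem pvGoB_mono_le {f g : Nat} (hfg : f ≤ g) (st : List (Int × Int)) (dir : Int × Int)
    (grid : List String) (s : PySem.Set (Int × Int)) (r : Bool)
    (h : pvGoB f st dir grid s = some r) : pvGoB g st dir grid s = some r := by
  induction g, hfg using Nat.le_induction with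
  | base => exact h
  | succ g hg ih => exact pvGoB_mono _ _ _ _ _ _ ih

theorem pvGoB_total (grid : List String) (dir : Int × Int) (hg : pvGood grid)
    (hd : pvUnitDir dir) : ∀ (f : Nat) (st : List (Int × Int)) (s : PySem.Set (Int × Int)),
    (∀ q ∈ st, pvInterior grid q) → 2 * pvFree grid s + st.length + 1 ≤ f →
    ∃ r, pvGoB f st dir grid s = some r := by
  intro f
  induction f with
  | zero => intro st s hst hfuel; omega
  | succ f ih =>
    intro st s hst hfuel
    cases st with
    | nil => exact ⟨true, by simp [pvGoB]⟩
    | cons p rest =>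
      have hrest : ∀ q ∈ rest, pvInterior grid q := fun q hq => hst q (List.mem_cons_of_mem _ hq)
      simp only [List.length_cons] at hfuel
      by_cases hm : p ∈ s
      · obtain ⟨r, hr⟩ := ih rest s hrest (by omega)
        exact ⟨r, by simp [pvGoB, hm, hr]⟩
      · have hp : pvInterior grid p := hst p List.mem_cons_self
        have hpc : p ∈ pvCells grid := pvInterior_mem grid p hp
        have hfree := pvFree_drop grid s p hpc hm
        have hnp := pvNp_mem grid dir p hd hp
        rcases hg.2.1 _ hnp with hc | hc | hc | hc
        · exact ⟨false, by simp [pvGoB, hm, hc]⟩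
        · obtain ⟨r, hr⟩ := ih rest (PySem.Set.add s p) hrest (by omega)
          rw [PySem.Set.add_of_not_mem hm] at hr
          exact ⟨r, by simp [pvGoB, hm, hc, hr]⟩
        · have hint : pvInterior grid (p.1 + dir.1, p.2 + dir.2) :=
            pvInterior_of_cell grid hg _ hnp (by rw [hc]; simp)
          have hc2 : pvCell grid (p.1 + dir.1, p.2 + dir.2 + 1) = some ']' :=
            hg.2.2.2.1 _ hnp hc
          obtain ⟨ha1, ha2, ha3, ha4⟩ := hint
          dsimp only at ha1 ha2 ha3 ha4
          have hmem2 : (p.1 + dir.1, p.2 + dir.2 + 1) ∈ pvCells grid :=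
            pvCell_mem_cells grid hg _ _ (by dsimp only; omega) (by dsimp only; omega) hc2
          have hint2 : pvInterior grid (p.1 + dir.1, p.2 + dir.2 + 1) :=
            pvInterior_of_cell grid hg _ hmem2 (by rw [hc2]; simp)
          obtain ⟨r, hr⟩ := ih
            ((p.1 + dir.1, p.2 + dir.2) :: (p.1 + dir.1, p.2 + dir.2 + 1) :: rest)
            (PySem.Set.add s p)
            (by intro q hq
                rcases List.mem_cons.1 hq with rfl | hq'
                · exact ⟨ha1, ha2, ha3, ha4⟩
                · rcases List.mem_cons.1 hq' with rfl | hq''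
                  · exact hint2
                  · exact hrest _ hq'')
            (by simp only [List.length_cons]; omega)
          rw [PySem.Set.add_of_not_mem hm] at hr
          exact ⟨r, by simp [pvGoB, hm, hc, hr]⟩
        · have hint : pvInterior grid (p.1 + dir.1, p.2 + dir.2) :=
            pvInterior_of_cell grid hg _ hnp (by rw [hc]; simp)
          have hc2 : pvCell grid (p.1 + dir.1, p.2 + dir.2 - 1) = some '[' :=
            hg.2.2.2.2 _ hnp hc
          obtain ⟨ha1, ha2, ha3, ha4⟩ := hint
          dsimp only at ha1 ha2 ha3 ha4
          have hmem2 : (p.1 + dir.1, p.2 + dir.2 - 1) ∈ pvCells grid :=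
            pvCell_mem_cells grid hg _ _ (by dsimp only; omega) (by dsimp only; omega) hc2
          have hint2 : pvInterior grid (p.1 + dir.1, p.2 + dir.2 - 1) :=
            pvInterior_of_cell grid hg _ hmem2 (by rw [hc2]; simp)
          obtain ⟨r, hr⟩ := ih
            ((p.1 + dir.1, p.2 + dir.2) :: (p.1 + dir.1, p.2 + dir.2 - 1) :: rest)
            (PySem.Set.add s p)
            (by intro q hq
                rcases List.mem_cons.1 hq with rfl | hq'
                · exact ⟨ha1, ha2, ha3, ha4⟩
                · rcases List.mem_cons.1 hq' with rfl | hq''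
                  · exact hint2
                  · exact hrest _ hq'')
            (by simp only [List.length_cons]; omega)
          rw [PySem.Set.add_of_not_mem hm] at hr
          exact ⟨r, by simp [pvGoB, hm, hc, hr]⟩

theorem pvSim (grid : List String) (dir : Int × Int) :
    ∀ (f : Nat) (pos : Int × Int) (s : PySem.Set (Int × Int)) (b : Bool)
      (s' : PySem.Set (Int × Int)), pvGoA f pos dir grid s = some (b, s') →
    (b = true → ∀ (rest : List (Int × Int)) (g : Nat) (r : Bool),
        pvGoB g rest dir grid s' = some r →
        pvGoB (3 ^ f + g) (pos :: rest) dir grid s = some r) ∧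
    (b = false → ∀ (rest : List (Int × Int)) (g : Nat),
        pvGoB (3 ^ f + g) (pos :: rest) dir grid s = some false) := by
  intro f
  induction f with
  | zero => intro pos s b s' h; simp [pvGoA] at h
  | succ f ih =>
    intro pos s b s' h
    have h3 : 1 ≤ 3 ^ f := Nat.one_le_pow _ _ (by norm_num)
    have hps : 3 ^ (f + 1) = 3 ^ f + 3 ^ f + 3 ^ f := by rw [pow_succ]; ring
    simp only [pvGoA] at h
    by_cases hm : pos ∈ s
    · rw [if_pos hm] at h
      simp only [Option.some.injEq, Prod.mk.injEq] at h
      obtain ⟨hb, rfl⟩ := h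
      subst hb
      refine ⟨fun _ rest g r hr => ?_, fun hbf => by simp at hbf⟩
      obtain ⟨k, hk⟩ : ∃ k, 3 ^ (f + 1) + g = k + 1 := ⟨3 ^ (f + 1) + g - 1, by omega⟩
      rw [hk]
      simp only [pvGoB]
      rw [if_pos hm]
      exact pvGoB_mono_le (by omega) _ _ _ _ _ hr
    · rw [if_neg hm] at h
      cases hc : pvCell grid (pos.1 + dir.1, pos.2 + dir.2) with
      | none => simp only [hc] at h; cases h
      | some c =>
        simp only [hc] at h
        by_cases h1 : c = '#'
        · subst h1
          rw [if_pos rfl] at h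
          simp only [Option.some.injEq, Prod.mk.injEq] at h
          obtain ⟨hb, rfl⟩ := h
          subst hb
          refine ⟨fun hbt => by simp at hbt, fun _ rest g => ?_⟩
          obtain ⟨k, hk⟩ : ∃ k, 3 ^ (f + 1) + g = k + 1 := ⟨3 ^ (f + 1) + g - 1, by omega⟩
          rw [hk]
          simp only [pvGoB]
          rw [if_neg hm]
          simp only [hc, reduceIte]
        · rw [if_neg h1] at h
          by_cases h2 : c = '.'
          · subst h2
            rw [if_pos rfl] at h
            simp only [Option.some.injEq, Prod.mk.injEq] at h
            obtain ⟨hb, rfl⟩ := h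
            subst hb
            refine ⟨fun _ rest g r hr => ?_, fun hbf => by simp at hbf⟩
            obtain ⟨k, hk⟩ : ∃ k, 3 ^ (f + 1) + g = k + 1 := ⟨3 ^ (f + 1) + g - 1, by omega⟩
            rw [hk]
            simp only [pvGoB]
            rw [if_neg hm]
            simp only [hc]
            exact pvGoB_mono_le (by omega) _ _ _ _ _ hr
          · rw [if_neg h2] at h
            by_cases h4 : c = '['
            · subst h4
              rw [if_pos rfl] at h
              cases ha : pvGoA f (pos.1 + dir.1, pos.2 + dir.2) dir grid
                  (PySem.Set.add s pos) with
              | none => simp only [ha] at h; cases h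
              | some pr =>
                obtain ⟨b1, s2⟩ := pr
                cases b1 with
                | false =>
                  simp only [ha] at h
                  simp only [Option.some.injEq, Prod.mk.injEq] at h
                  obtain ⟨hb, rfl⟩ := h
                  subst hb
                  have IH1 := (ih _ _ _ _ ha).2 rfl
                  refine ⟨fun hbt => by simp at hbt, fun _ rest g => ?_⟩
                  obtain ⟨k, hk⟩ : ∃ k, 3 ^ (f + 1) + g = k + 1 :=
                    ⟨3 ^ (f + 1) + g - 1, by omega⟩
                  rw [hk]
                  simp only [pvGoB]
                  rw [if_neg hm]
                  simp only [hc, reduceIte]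
                  have hkk : 3 ^ f + (k - 3 ^ f) = k := by omega
                  have := IH1 ((pos.1 + dir.1, pos.2 + dir.2 + 1) :: rest) (k - 3 ^ f)
                  rw [hkk] at this
                  exact this
                | true =>
                  simp only [ha] at h
                  have IH1 := (ih _ _ _ _ ha).1 rfl
                  have IH2 := ih _ _ _ _ h
                  constructor
                  · intro hbt rest g r hr
                    have I2 := IH2.1 hbt rest g r hr
                    have I1 := IH1 _ (3 ^ f + g) r I2
                    obtain ⟨k, hk⟩ : ∃ k, 3 ^ (f + 1) + g = k + 1 :=
                      ⟨3 ^ (f + 1) + g - 1, by omega⟩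
                    rw [hk]
                    simp only [pvGoB]
                    rw [if_neg hm]
                    simp only [hc, reduceIte]
                    exact pvGoB_mono_le (by omega) _ _ _ _ _ I1
                  · intro hbf rest g
                    have I2 := IH2.2 hbf rest g
                    have I1 := IH1 _ (3 ^ f + g) false I2
                    obtain ⟨k, hk⟩ : ∃ k, 3 ^ (f + 1) + g = k + 1 :=
                      ⟨3 ^ (f + 1) + g - 1, by omega⟩
                    rw [hk]
                    simp only [pvGoB]
                    rw [if_neg hm]
                    simp only [hc, reduceIte]
                    exact pvGoB_mono_le (by omega) _ _ _ _ _ I1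
            · rw [if_neg h4] at h
              by_cases h5 : c = ']'
              · subst h5
                rw [if_pos rfl] at h
                cases ha : pvGoA f (pos.1 + dir.1, pos.2 + dir.2) dir grid
                    (PySem.Set.add s pos) with
                | none => simp only [ha] at h; cases h
                | some pr =>
                  obtain ⟨b1, s2⟩ := pr
                  cases b1 with
                  | false =>
                    simp only [ha] at h
                    simp only [Option.some.injEq, Prod.mk.injEq] at h
                    obtain ⟨hb, rfl⟩ := h
                    subst hb
                    have IH1 := (ih _ _ _ _ ha).2 rfl
                    refine ⟨fun hbt => by simp at hbt, fun _ rest g => ?_⟩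
                    obtain ⟨k, hk⟩ : ∃ k, 3 ^ (f + 1) + g = k + 1 :=
                      ⟨3 ^ (f + 1) + g - 1, by omega⟩
                    rw [hk]
                    simp only [pvGoB]
                    rw [if_neg hm]
                    simp only [hc, reduceIte]
                    have hkk : 3 ^ f + (k - 3 ^ f) = k := by omega
                    have := IH1 ((pos.1 + dir.1, pos.2 + dir.2 - 1) :: rest) (k - 3 ^ f)
                    rw [hkk] at this
                    exact this
                  | true =>
                    simp only [ha] at h
                    have IH1 := (ih _ _ _ _ ha).1 rfl
                    have IH2 := ih _ _ _ _ h
                    constructor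
                    · intro hbt rest g r hr
                      have I2 := IH2.1 hbt rest g r hr
                      have I1 := IH1 _ (3 ^ f + g) r I2
                      obtain ⟨k, hk⟩ : ∃ k, 3 ^ (f + 1) + g = k + 1 :=
                        ⟨3 ^ (f + 1) + g - 1, by omega⟩
                      rw [hk]
                      simp only [pvGoB]
                      rw [if_neg hm]
                      simp only [hc, reduceIte]
                      exact pvGoB_mono_le (by omega) _ _ _ _ _ I1
                    · intro hbf rest g
                      have I2 := IH2.2 hbf rest g
                      have I1 := IH1 _ (3 ^ f + g) false I2
                      obtain ⟨k, hk⟩ : ∃ k, 3 ^ (f + 1) + g = k + 1 :=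
                        ⟨3 ^ (f + 1) + g - 1, by omega⟩
                      rw [hk]
                      simp only [pvGoB]
                      rw [if_neg hm]
                      simp only [hc, reduceIte]
                      exact pvGoB_mono_le (by omega) _ _ _ _ _ I1
              · rw [if_neg h5] at h; cases h

-- ===== VERDICT (by name: the statement is the Claim_ definition above) =====
theorem valid_bfs_spec : Claim_equal_valid_bfs := by
  unfold Claim_equal_valid_bfs Spec_valid_bfs
  intro pos direction grid seen _ hpre
  by_cases hm : pos ∈ seen
  · have hm' : pos ∈ PySem.Set.ofList seen := (PySem.Set.mem_ofList _ _).2 hm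
    unfold valid_bfs valid_bfs_alt
    rw [show 2 * (pvCells grid).length + 2 = (2 * (pvCells grid).length + 1) + 1 from rfl]
    simp [pvGoA, pvGoB, hm']
  · have hm' : pos ∉ PySem.Set.ofList seen := fun h => hm ((PySem.Set.mem_ofList _ _).1 h)
    rcases hpre with h | hnb | hnb | ⟨hg, hd, hint⟩
    · exact absurd h hm
    · unfold pvNbr at hnb
      unfold valid_bfs valid_bfs_alt
      rw [show 2 * (pvCells grid).length + 2 = (2 * (pvCells grid).length + 1) + 1 from rfl]
      simp [pvGoA, pvGoB, hm', hnb]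
    · unfold pvNbr at hnb
      unfold valid_bfs valid_bfs_alt
      rw [show 2 * (pvCells grid).length + 2 = (2 * (pvCells grid).length + 1) + 1 from rfl]
      simp [pvGoA, pvGoB, hm', hnb]
    · obtain ⟨bA, sA, hA⟩ := pvGoA_total grid direction hg hd ((pvCells grid).length + 1) pos
        (PySem.Set.ofList seen) hint
        (by have := pvFree_le grid (PySem.Set.ofList seen); omega)
      obtain ⟨r, hB⟩ := pvGoB_total grid direction hg hd (2 * (pvCells grid).length + 2) [pos]
        (PySem.Set.ofList seen)
        (by intro q hq
            rcases List.mem_cons.1 hq with rfl | h'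
            · exact hint
            · cases h')
        (by have := pvFree_le grid (PySem.Set.ofList seen)
            simp only [List.length_cons, List.length_nil]; omega)
      have hsim := pvSim grid direction _ _ _ _ _ hA
      have hBb : pvGoB (3 ^ ((pvCells grid).length + 1) + 0) [pos] direction grid
          (PySem.Set.ofList seen) = some bA := by
        cases bA with
        | true => exact hsim.1 rfl [] 0 true (by simp [pvGoB])
        | false => exact hsim.2 rfl [] 0
      have hle1 := pvGoB_mono_le
        (le_max_left (3 ^ ((pvCells grid).length + 1) + 0) (2 * (pvCells grid).length + 2))
        _ _ _ _ _ hBb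
      have hle2 := pvGoB_mono_le
        (le_max_right (3 ^ ((pvCells grid).length + 1) + 0) (2 * (pvCells grid).length + 2))
        _ _ _ _ _ hB
      have hbr : bA = r := Option.some.inj (hle1.symm.trans hle2)
      unfold valid_bfs valid_bfs_alt
      simp only [hA, hB]
      exact hbr
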